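-- pv_equiv track=rewrite | github.com/azar-management-consulting/occp-core | orchestrator/task_router.py | _estimate_duration
-- ===== SOURCE A (Python) =====
-- def _estimate_duration(agents: list[str]) -> str:
--     """Estimate task duration based on agent count and types.
--
--     Returns: "5m"|"15m"|"30m"|"1h"|"2h"
--     """
--     # Base duration per agent type
--     durations = {
--         "eng-core": 30,
--         "wp-web": 30,
--         "infra-ops": 45,
--         "design-lab": 20,
--         "content-forge": 15,
--         "social-growth": 15,
--         "intel-research": 45,
--         "biz-strategy": 30,
--     }
--
--     total_minutes = sum(durations.get(a, 15) for a in agents)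
--
--     if total_minutes <= 5:
--         return "5m"
--     if total_minutes <= 15:
--         return "15m"
--     if total_minutes <= 30:
--         return "30m"
--     if total_minutes <= 60:
--         return "1h"
--     return "2h"
-- ===== SOURCE B (Python) =====
-- _EXTRA = {  # minutes beyond the 15-minute base, per agent type
--     "eng-core": 15,
--     "wp-web": 15,
--     "infra-ops": 30,
--     "design-lab": 5,
--     "intel-research": 30,
--     "biz-strategy": 15,
-- }
--
-- _TABLE = ((5, "5m"), (15, "15m"), (30, "30m"), (60, "1h"))
--
--
-- def _estimate_duration(agents: list[str]) -> str:
--     # Count each distinct agent type once, then combine counts arithmetically: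
--     # every agent contributes a 15-minute base, plus a per-type extra weighted
--     # by its multiplicity.
--     counts = {}
--     for a in agents:
--         counts[a] = counts.get(a, 0) + 1
--     total = 15 * len(agents)
--     for kind, n in counts.items():
--         total += _EXTRA.get(kind, 0) * n
--     for limit, label in _TABLE:
--         if total <= limit:
--             return label
--     return "2h"
-- ===== Notes on version B (the rewrite author's own statement) =====
-- stated objective: alternative
-- what changed: B groups the agents into a multiplicity counter and computes the total as 15*len(agents) plus per-type extras weighted by count (instead of summing a dict lookup per agent), and buckets the total by scanning a (threshold,label) table instead of an if-chain.
import Mathlib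
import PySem

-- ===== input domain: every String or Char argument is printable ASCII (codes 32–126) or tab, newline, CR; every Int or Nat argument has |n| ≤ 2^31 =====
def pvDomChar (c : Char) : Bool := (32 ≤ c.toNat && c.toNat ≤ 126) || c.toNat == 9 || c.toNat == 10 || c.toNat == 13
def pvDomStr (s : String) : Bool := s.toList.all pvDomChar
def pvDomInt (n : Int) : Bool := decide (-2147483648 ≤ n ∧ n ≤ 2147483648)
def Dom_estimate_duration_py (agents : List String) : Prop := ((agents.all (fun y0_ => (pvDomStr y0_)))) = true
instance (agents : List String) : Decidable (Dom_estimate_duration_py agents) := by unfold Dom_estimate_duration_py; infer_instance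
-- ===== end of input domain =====

-- B counts each distinct agent type once and computes 15*len + count-weighted extras,
-- then buckets by scanning a (threshold,label) table (objective: alternative).

-- ===== PORT A =====
def pvDurations : PySem.Dict String Int := PySem.Dict.ofList
  [("eng-core", 30), ("wp-web", 30), ("infra-ops", 45), ("design-lab", 20),
   ("content-forge", 15), ("social-growth", 15), ("intel-research", 45), ("biz-strategy", 30)]

def estimate_duration_py (agents : List String) : String :=
  let total_minutes : Int := agents.foldl (fun acc a => acc + PySem.Dict.getD pvDurations a 15) 0
  if total_minutes <= 5 then "5m"
  else if total_minutes <= 15 then "15m"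
  else if total_minutes <= 30 then "30m"
  else if total_minutes <= 60 then "1h"
  else "2h"

-- ===== PORT B =====
def pvExtra : PySem.Dict String Int := PySem.Dict.ofList
  [("eng-core", 15), ("wp-web", 15), ("infra-ops", 30), ("design-lab", 5),
   ("intel-research", 30), ("biz-strategy", 15)]

def pvTable : List (Int × String) := [(5, "5m"), (15, "15m"), (30, "30m"), (60, "1h")]

-- the 'for limit, label in _TABLE: if total <= limit: return label' loop
def pvBucket (table : List (Int × String)) (t : Int) : String :=
  match table with
  | [] => "2h"
  | (limit, label) :: rest => if t ≤ limit then label else pvBucket rest t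

def estimate_duration_py_alt (agents : List String) : String :=
  let counts : PySem.Dict String Int :=
    agents.foldl (fun d a => d.insert a (d.getD a 0 + 1)) PySem.Dict.empty
  let total : Int :=
    counts.items.foldl (fun acc p => acc + pvExtra.getD p.1 0 * p.2) (15 * agents.length)
  pvBucket pvTable total

-- ===== PRECONDITION & SPEC =====
def Spec_estimate_duration_py (agents : List String) (out : String) : Prop := out = estimate_duration_py_alt agents
instance (agents : List String) (out : String) : Decidable (Spec_estimate_duration_py agents out) := by unfold Spec_estimate_duration_py; infer_instance

-- ===== CLAIM =====
def Claim_equal_estimate_duration_py : Prop := ∀ (agents : List String), Dom_estimate_duration_py agents → Spec_estimate_duration_py agents (estimate_duration_py agents)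

-- ===== LEMMAS AND PROOFS =====
-- per-string: A's duration is 15 plus B's extra
theorem pv_dur_eq (a : String) : pvDurations.getD a 15 = 15 + pvExtra.getD a 0 := by
  have hd : pvDurations = PySem.Dict.mk
      [("eng-core", 30), ("wp-web", 30), ("infra-ops", 45), ("design-lab", 20),
       ("content-forge", 15), ("social-growth", 15), ("intel-research", 45), ("biz-strategy", 30)] := by decide
  have he : pvExtra = PySem.Dict.mk
      [("eng-core", 15), ("wp-web", 15), ("infra-ops", 30), ("design-lab", 5),
       ("intel-research", 30), ("biz-strategy", 15)] := by decide
  rw [hd, he]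
  clear hd he
  simp only [PySem.Dict.getD, PySem.Dict.get?_mk_cons, beq_iff_eq]
  split_ifs <;> first | rfl | (subst_vars; simp_all)

-- summing g over a nodup index list covering xs, weighted by multiplicity, equals summing g over xs
theorem pv_sum_delta {α : Type} [DecidableEq α] (g : α → Int) (a : α) :
    ∀ (ks : List α), ks.Nodup → a ∈ ks →
      (ks.map (fun k => g k * (if a = k then (1 : Int) else 0))).sum = g a := by
  intro ks
  induction ks with
  | nil => intro _ h; cases h
  | cons k rest ih =>
    intro hnd hmem
    rcases List.nodup_cons.mp hnd with ⟨hk, hrest⟩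
    rcases List.mem_cons.mp hmem with h | h
    · subst h
      have : (rest.map (fun k => g k * (if a = k then (1 : Int) else 0))).sum = 0 := by
        apply List.sum_eq_zero
        intro x hx
        rcases List.mem_map.mp hx with ⟨b, hb, rfl⟩
        have : a ≠ b := fun he => hk (he ▸ hb)
        simp [this]
      rw [List.map_cons, List.sum_cons, if_pos rfl, mul_one, this, add_zero]
    · have hne : a ≠ k := fun he => hk (he ▸ h)
      rw [List.map_cons, List.sum_cons, if_neg hne, mul_zero, zero_add, ih hrest h]

theorem pv_sum_count {α : Type} [DecidableEq α] (g : α → Int) (xs : List α) :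
    ∀ (ks : List α), ks.Nodup → (∀ a ∈ xs, a ∈ ks) →
      (ks.map (fun k => g k * (xs.count k : Int))).sum = (xs.map g).sum := by
  induction xs with
  | nil => intro ks _ _; simp
  | cons a t ih =>
    intro ks hnd hsub
    have hsum : (ks.map (fun k => g k * ((a :: t).count k : Int))).sum
        = (ks.map (fun k => g k * (t.count k : Int))).sum
          + (ks.map (fun k => g k * (if a = k then (1 : Int) else 0))).sum := by
      rw [← List.sum_map_add]
      apply congrArg
      apply List.map_congr_left
      intro k _
      by_cases h : a = k <;> simp [h] <;> ring
    rw [hsum, ih ks hnd (fun b hb => hsub b (List.mem_cons_of_mem a hb)),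
        pv_sum_delta g a ks hnd (hsub a (List.mem_cons_self ..))]
    simp [add_comm]

-- the two totals agree
theorem pv_total_eq (agents : List String) :
    agents.foldl (fun acc a => acc + PySem.Dict.getD pvDurations a 15) 0
      = ((agents.foldl (fun d a => d.insert a (d.getD a 0 + 1)) PySem.Dict.empty).items).foldl
          (fun acc p => acc + pvExtra.getD p.1 0 * p.2) (15 * agents.length) := by
  rw [PySem.Dict.foldl_insert_getD_add_one_eq_counter, PySem.Dict.items_counter,
      PySem.List.foldl_add, PySem.List.foldl_add]
  have h1 : (agents.map (fun a => PySem.Dict.getD pvDurations a 15)).sum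
      = (agents.map (fun a => 15 + pvExtra.getD a 0)).sum := by
    apply congrArg
    apply List.map_congr_left
    intro a _
    exact pv_dur_eq a
  have h2 : (agents.map (fun a => (15 : Int) + pvExtra.getD a 0)).sum
      = 15 * agents.length + (agents.map (fun a => pvExtra.getD a 0)).sum := by
    rw [List.sum_map_add]
    simp [mul_comm]
  have h3 : (((PySem.Set.ofList agents).map (fun k => (k, (agents.count k : Int)))).map
        (fun p => pvExtra.getD p.1 0 * p.2)).sum
      = (agents.map (fun a => pvExtra.getD a 0)).sum := by
    rw [List.map_map]
    exact pv_sum_count (fun a => pvExtra.getD a 0) agents (PySem.Set.ofList agents)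
      (PySem.Set.nodup_ofList agents) (fun a ha => (PySem.Set.mem_ofList ..).mpr ha)
  simp only [zero_add, h1, h2, h3]

-- the if-chain and the table scan agree at every total
theorem pv_bucket_eq (t : Int) :
    (if t <= 5 then "5m" else if t <= 15 then "15m" else if t <= 30 then "30m"
     else if t <= 60 then "1h" else "2h") = pvBucket pvTable t := by
  simp only [pvTable, pvBucket]

-- ===== VERDICT =====
theorem estimate_duration_py_spec : Claim_equal_estimate_duration_py := by
  intro agents _
  unfold Spec_estimate_duration_py estimate_duration_py estimate_duration_py_alt
  show (let t := agents.foldl (fun acc a => acc + PySem.Dict.getD pvDurations a 15) 0;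
    if t <= 5 then "5m" else if t <= 15 then "15m" else if t <= 30 then "30m"
    else if t <= 60 then "1h" else "2h")
      = pvBucket pvTable (((agents.foldl (fun d a => d.insert a (d.getD a 0 + 1)) PySem.Dict.empty).items).foldl
          (fun acc p => acc + pvExtra.getD p.1 0 * p.2) (15 * agents.length))
  rw [show (let t := agents.foldl (fun acc a => acc + PySem.Dict.getD pvDurations a 15) 0;
    if t <= 5 then "5m" else if t <= 15 then "15m" else if t <= 30 then "30m"
    else if t <= 60 then "1h" else "2h") =
    (if (agents.foldl (fun acc a => acc + PySem.Dict.getD pvDurations a 15) 0) <= 5 then "5m"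
     else if (agents.foldl (fun acc a => acc + PySem.Dict.getD pvDurations a 15) 0) <= 15 then "15m"
     else if (agents.foldl (fun acc a => acc + PySem.Dict.getD pvDurations a 15) 0) <= 30 then "30m"
     else if (agents.foldl (fun acc a => acc + PySem.Dict.getD pvDurations a 15) 0) <= 60 then "1h" else "2h") from rfl,
    ← pv_total_eq agents]
  exact pv_bucket_eq _
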